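-- pv_equiv track=rewrite | github.com/arrowlimo/arrow-limo | scripts/extract_epson_classifications_from_images.py | merge_pairs
-- ===== SOURCE A (Python) =====
-- from typing import List, Tuple, Dict
--
-- def merge_pairs(list_of_pairs: List[List[Tuple[str, str | None]]]) -> Dict[str, List[str]]:
--     out: Dict[str, List[str]] = {}
--     for pairs in list_of_pairs:
--         for c, s in pairs:
--             if c not in out:
--                 out[c] = []
--             if s and s not in out[c]:
--                 out[c].append(s)
--     return out
-- ===== SOURCE B (Python) =====
-- def merge_pairs(list_of_pairs):
--     # Flatten-then-group: compute the ordered distinct keys once, then build each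
--     # key's value list by one filtered scan of the flat pair list, deduped in order.
--     flat = [pair for pairs in list_of_pairs for pair in pairs]
--     keys = list(dict.fromkeys(c for c, _ in flat))
--     return {c: list(dict.fromkeys(s for k, s in flat if k == c and s))
--             for c in keys}
-- ===== Notes on version B (the rewrite author's own statement) =====
-- stated objective: alternative
-- what changed: B replaces A's incremental dict building (nested loops with a per-insert membership check) by a flatten-then-group algorithm: it flattens the nested pairs once, computes the ordered distinct keys, then builds each key's value list by a separate filtered scan of the flat list deduplicated in first-occurrence order.
import Mathlib
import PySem

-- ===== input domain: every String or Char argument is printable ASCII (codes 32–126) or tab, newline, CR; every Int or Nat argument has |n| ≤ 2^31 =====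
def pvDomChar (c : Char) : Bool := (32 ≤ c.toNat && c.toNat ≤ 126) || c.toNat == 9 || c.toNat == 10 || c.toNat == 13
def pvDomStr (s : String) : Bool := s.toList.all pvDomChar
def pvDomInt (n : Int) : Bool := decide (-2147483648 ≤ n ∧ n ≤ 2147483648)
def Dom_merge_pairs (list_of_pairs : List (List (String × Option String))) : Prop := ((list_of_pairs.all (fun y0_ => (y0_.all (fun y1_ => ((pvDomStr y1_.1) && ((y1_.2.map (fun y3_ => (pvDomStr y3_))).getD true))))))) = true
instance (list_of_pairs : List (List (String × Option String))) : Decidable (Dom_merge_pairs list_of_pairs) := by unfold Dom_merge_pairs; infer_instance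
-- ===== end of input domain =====

-- B replaces A's incremental dict building (nested loops, per-insert membership check) by a
-- flatten-then-group algorithm: ordered distinct keys first, then one filtered scan per key.

-- ===== PORT A =====
-- Python dict as insertion-ordered assoc list with unique keys (A-side helpers)
def mpContains (st : List (String × List String)) (c : String) : Bool :=
  st.any (fun kv => kv.1 == c)
def mpGet (st : List (String × List String)) (c : String) : List String :=
  ((st.find? (fun kv => kv.1 == c)).map Prod.snd).getD []
def mpAppend (st : List (String × List String)) (c : String) (t : String) : List (String × List String) :=
  st.map (fun kv => if kv.1 == c then (kv.1, kv.2 ++ [t]) else kv)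

-- one iteration of A's inner loop body
def mpStepA (out : List (String × List String)) (p : String × Option String) : List (String × List String) :=
  let out1 := if mpContains out p.1 then out else out ++ [(p.1, [])]
  match p.2 with
  | none => out1                                   -- `if s and …`: None is falsy
  | some t => if t ≠ "" ∧ t ∉ mpGet out1 p.1 then mpAppend out1 p.1 t else out1

def merge_pairs (list_of_pairs : List (List (String × Option String))) : List (String × List String) :=
  list_of_pairs.foldl (fun out pairs => pairs.foldl mpStepA out) []

-- ===== PORT B =====
-- list(dict.fromkeys(it)): first-occurrence-order dedup, exact for dict.fromkeys on strings
def pyDedup (l : List String) : List String :=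
  l.foldl (fun acc x => if x ∈ acc then acc else acc ++ [x]) []

-- the generator `s for k, s in flat if k == c and s`
def mpVals (flat : List (String × Option String)) (c : String) : List String :=
  flat.filterMap (fun kv => match kv.2 with
    | some t => if kv.1 == c ∧ t ≠ "" then some t else none
    | none => none)

def merge_pairs_alt (list_of_pairs : List (List (String × Option String))) : List (String × List String) :=
  let flat := list_of_pairs.flatten
  let keys := pyDedup (flat.map Prod.fst)
  keys.map (fun c => (c, pyDedup (mpVals flat c)))

-- ===== PRECONDITION & SPEC =====
def Spec_merge_pairs (list_of_pairs : List (List (String × Option String))) (out : List (String × List String)) : Prop := out = merge_pairs_alt list_of_pairs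
instance (list_of_pairs : List (List (String × Option String))) (out : List (String × List String)) : Decidable (Spec_merge_pairs list_of_pairs out) := by unfold Spec_merge_pairs; infer_instance

-- ===== CLAIM (what is proved, stated in full; the proofs are below) =====
def Claim_equal_merge_pairs : Prop := ∀ (list_of_pairs : List (List (String × Option String))), Dom_merge_pairs list_of_pairs → Spec_merge_pairs list_of_pairs (merge_pairs list_of_pairs)

-- ===== LEMMAS AND PROOFS =====

-- dedup-into-accumulator (pyDedup with a non-empty starting accumulator)
def dIn (acc l : List String) : List String :=
  l.foldl (fun a x => if x ∈ a then a else a ++ [x]) acc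

-- new keys of a string list, in first-occurrence order, given an already-seen list
def nk (ks : List String) : List String → List String
  | [] => []
  | x :: l => if x ∈ ks then nk ks l else x :: nk (ks ++ [x]) l

-- closed form of A's fold from an arbitrary state
def mergeC (st : List (String × List String)) (flat : List (String × Option String)) : List (String × List String) :=
  st.map (fun kv => (kv.1, dIn kv.2 (mpVals flat kv.1)))
    ++ (nk (st.map Prod.fst) (flat.map Prod.fst)).map (fun c => (c, dIn [] (mpVals flat c)))

lemma dIn_eq_append_nk (l : List String) : ∀ acc, dIn acc l = acc ++ nk acc l := by
  induction l with
  | nil => intro acc; simp [dIn, nk]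
  | cons x l ih =>
    intro acc
    by_cases h : x ∈ acc
    · simpa [dIn, nk, h] using ih acc
    · have := ih (acc ++ [x])
      simp [dIn, nk, h] at this ⊢
      simpa [List.append_assoc] using this

lemma mem_nk {x : String} : ∀ {ks l : List String}, x ∈ nk ks l → x ∉ ks := by
  intro ks l
  induction l generalizing ks with
  | nil => simp [nk]
  | cons y l ih =>
    intro h
    by_cases hy : y ∈ ks
    · exact ih (by simpa [nk, hy] using h)
    · rcases by simpa [nk, hy] using h with h | h
      · exact h ▸ hy
      · intro hx; exact ih h (by simp [hx])

lemma mpVals_cons (p : String × Option String) (rest : List (String × Option String)) (c : String) :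
    mpVals (p :: rest) c
      = match p.2 with
        | some t => if p.1 = c ∧ t ≠ "" then t :: mpVals rest c else mpVals rest c
        | none => mpVals rest c := by
  cases h : p.2 with
  | none => simp [mpVals, h]
  | some t =>
    by_cases hc : p.1 = c ∧ t ≠ "" <;> simp [mpVals, h, hc]

lemma keys_mpAppend (st : List (String × List String)) (c t : String) :
    (mpAppend st c t).map Prod.fst = st.map Prod.fst := by
  unfold mpAppend
  induction st with
  | nil => rfl
  | cons kv rest ih => by_cases h : kv.1 = c <;> simp_all

lemma not_contains_iff (st : List (String × List String)) (c : String) :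
    mpContains st c = false ↔ c ∉ st.map Prod.fst := by
  simp only [mpContains, List.any_eq_false, List.mem_map, beq_iff_eq, not_exists, not_and]

lemma mpAppend_of_not_mem (st : List (String × List String)) (c t : String)
    (h : c ∉ st.map Prod.fst) : mpAppend st c t = st := by
  unfold mpAppend
  have : st.map (fun kv => if kv.1 == c then (kv.1, kv.2 ++ [t]) else kv) = st.map id := by
    refine List.map_congr_left fun kv hkv => ?_
    have hne : kv.1 ≠ c := fun e => h (e ▸ List.mem_map_of_mem hkv)
    simp [hne]
  simpa using this

lemma mpAppend_append_last (st : List (String × List String)) (c t : String) (l : List String)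
    (h : c ∉ st.map Prod.fst) :
    mpAppend (st ++ [(c, l)]) c t = st ++ [(c, l ++ [t])] := by
  have h1 : st.map (fun kv => if kv.1 == c then (kv.1, kv.2 ++ [t]) else kv) = st := by
    have := mpAppend_of_not_mem st c t h
    simpa [mpAppend] using this
  unfold mpAppend
  rw [List.map_append, h1]
  simp

lemma mpGet_eq_of_mem (st : List (String × List String)) (kv : String × List String)
    (hnd : (st.map Prod.fst).Nodup) (hmem : kv ∈ st) : mpGet st kv.1 = kv.2 := by
  induction st with
  | nil => simp at hmem
  | cons hd rest ih =>
    have h' := hnd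
    simp only [List.map_cons, List.nodup_cons] at h'
    obtain ⟨hnot, hrest⟩ := h'
    rcases List.mem_cons.mp hmem with rfl | hmem'
    · simp [mpGet]
    · have hne : hd.1 ≠ kv.1 := fun e => hnot (e ▸ List.mem_map_of_mem hmem')
      have hb : (hd.1 == kv.1) = false := by simpa using hne
      simpa [mpGet, hb] using ih hrest hmem'

lemma mpGet_append_last (st : List (String × List String)) (c : String) (l : List String)
    (h : c ∉ st.map Prod.fst) : mpGet (st ++ [(c, l)]) c = l := by
  induction st with
  | nil => simp [mpGet]
  | cons hd rest ih =>
    have hne : hd.1 ≠ c := by intro e; exact h (by simp [e])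
    have hb : (hd.1 == c) = false := by simpa using hne
    simpa [mpGet, hb] using ih (fun hm => h (by simp [hm]))

lemma keys_stepA (st : List (String × List String)) (p : String × Option String)
    (hnd : (st.map Prod.fst).Nodup) : ((mpStepA st p).map Prod.fst).Nodup := by
  unfold mpStepA
  have h1 : ((if mpContains st p.1 then st else st ++ [(p.1, [])]).map Prod.fst).Nodup := by
    by_cases hc : mpContains st p.1
    · simpa [hc]
    · have := (not_contains_iff st p.1).mp (by simpa using hc)
      rw [if_neg hc, List.map_append]
      refine List.Nodup.append hnd (List.nodup_singleton _) ?_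
      intro x hx hx'
      exact this ((List.mem_singleton.mp hx') ▸ hx)
  cases p.2 with
  | none => simpa using h1
  | some t =>
    dsimp only
    by_cases hc : mpContains st p.1
    · rw [if_pos hc] at h1 ⊢
      split_ifs with hm
      · rw [keys_mpAppend]; exact h1
      · exact h1
    · rw [if_neg hc] at h1 ⊢
      split_ifs with hm
      · rw [keys_mpAppend]; exact h1
      · exact h1

lemma nk_map_congr (ks : List String) (l : List String)
    (f g : String → String × List String) (h : ∀ c ∈ nk ks l, f c = g c) :
    (nk ks l).map f = (nk ks l).map g := List.map_congr_left h

lemma step_mergeC (st : List (String × List String)) (p : String × Option String)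
    (rest : List (String × Option String)) (hnd : (st.map Prod.fst).Nodup) :
    mergeC (mpStepA st p) rest = mergeC st (p :: rest) := by
  obtain ⟨c, o⟩ := p
  -- whether the value is truthy
  rcases ho : o with _ | t
  case none =>
    -- no value appended; state may gain the key c with []
    by_cases hc : mpContains st c
    · have hmem : c ∈ st.map Prod.fst := by
        rcases (List.any_eq_true.mp hc) with ⟨kv, hkv, he⟩
        exact (beq_iff_eq.mp he) ▸ List.mem_map_of_mem hkv
      have hA : mpStepA st (c, none) = st := by simp [mpStepA, hc]
      rw [hA]
      unfold mergeC
      simp only [mpVals_cons, List.map_cons, nk, hmem, if_pos]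
    · have hnmem : c ∉ st.map Prod.fst := (not_contains_iff st c).mp (by simpa using hc)
      have hA : mpStepA st (c, none) = st ++ [(c, [])] := by simp [mpStepA, hc]
      rw [hA]
      unfold mergeC
      simp only [mpVals_cons, List.map_append, List.map_cons, List.map_nil, nk, hnmem,
        List.append_assoc]
      simp
  case some =>
    by_cases ht : t = ""
    · -- falsy value: same as none case
      subst ht
      by_cases hc : mpContains st c
      · have hmem : c ∈ st.map Prod.fst := by
          rcases (List.any_eq_true.mp hc) with ⟨kv, hkv, he⟩
          exact (beq_iff_eq.mp he) ▸ List.mem_map_of_mem hkv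
        have hA : mpStepA st (c, some "") = st := by simp [mpStepA, hc]
        rw [hA]
        unfold mergeC
        have hv : ∀ c', mpVals ((c, some "") :: rest) c' = mpVals rest c' := by
          intro c'; simp [mpVals_cons]
        simp only [hv, List.map_cons, nk, hmem, if_pos]
      · have hnmem : c ∉ st.map Prod.fst := (not_contains_iff st c).mp (by simpa using hc)
        have hA : mpStepA st (c, some "") = st ++ [(c, [])] := by simp [mpStepA, hc]
        rw [hA]
        unfold mergeC
        have hv : ∀ c', mpVals ((c, some "") :: rest) c' = mpVals rest c' := by
          intro c'; simp [mpVals_cons]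
        simp only [hv, List.map_append, List.map_cons, List.map_nil, List.append_assoc]
        simp [nk, hnmem]
    · -- truthy value t
      have hvals : ∀ c', mpVals ((c, some t) :: rest) c'
          = if c = c' then t :: mpVals rest c' else mpVals rest c' := by
        intro c'; by_cases h : c = c' <;> simp [mpVals_cons, h, ht]
      by_cases hc : mpContains st c
      · have hmem : c ∈ st.map Prod.fst := by
          rcases (List.any_eq_true.mp hc) with ⟨kv, hkv, he⟩
          exact (beq_iff_eq.mp he) ▸ List.mem_map_of_mem hkv
        -- the nk tails agree
        have hnk : (nk (st.map Prod.fst) (((c, some t) :: rest).map Prod.fst))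
            = nk (st.map Prod.fst) (rest.map Prod.fst) := by
          simp [nk, hmem]
        have htail : ∀ stX : List (String × List String), stX.map Prod.fst = st.map Prod.fst →
            (nk (stX.map Prod.fst) (rest.map Prod.fst)).map
                (fun c' => (c', dIn [] (mpVals rest c')))
              = (nk (st.map Prod.fst) (((c, some t) :: rest).map Prod.fst)).map
                (fun c' => (c', dIn [] (mpVals ((c, some t) :: rest) c'))) := by
          intro stX hk
          rw [hk, hnk]
          refine nk_map_congr _ _ _ _ fun c' hc' => ?_
          have hne : ¬ (c = c') := fun e => mem_nk hc' (e ▸ hmem)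
          simp [hvals, hne]
        by_cases hmemv : t ∈ mpGet st c
        · have hA : mpStepA st (c, some t) = st := by
            simp [mpStepA, hc, hmemv]
          rw [hA]
          unfold mergeC
          rw [← htail st rfl]
          congr 1
          refine List.map_congr_left fun kv hkv => ?_
          by_cases hk : c = kv.1
          · have hget : mpGet st kv.1 = kv.2 := mpGet_eq_of_mem st kv hnd hkv
            have htm : t ∈ kv.2 := by rw [← hget, ← hk]; exact hmemv
            simp [hvals, ← hk, dIn, htm]
          · simp [hvals, hk]
        · have hA : mpStepA st (c, some t) = mpAppend st c t := by
            simp [mpStepA, hc, hmemv, ht]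
          rw [hA]
          unfold mergeC
          rw [← htail (mpAppend st c t) (keys_mpAppend st c t), keys_mpAppend]
          congr 1
          unfold mpAppend
          rw [List.map_map]
          refine List.map_congr_left fun kv hkv => ?_
          by_cases hk : c = kv.1
          · have hget : mpGet st kv.1 = kv.2 := mpGet_eq_of_mem st kv hnd hkv
            have htm : t ∉ kv.2 := by rw [← hget, ← hk]; exact hmemv
            simp [Function.comp, hvals, ← hk, dIn, htm]
          · have : kv.1 ≠ c := fun e => hk e.symm
            simp [Function.comp, hvals, hk, this]
      · have hnmem : c ∉ st.map Prod.fst := (not_contains_iff st c).mp (by simpa using hc)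
        have hget1 : mpGet (st ++ [(c, [])]) c = [] := mpGet_append_last st c [] hnmem
        have hA : mpStepA st (c, some t) = st ++ [(c, [t])] := by
          have h1 : mpStepA st (c, some t) = mpAppend (st ++ [(c, [])]) c t := by
            simp [mpStepA, hc, hget1, ht]
          simpa using h1.trans (mpAppend_append_last st c t [] hnmem)
        rw [hA]
        unfold mergeC
        simp only [List.map_append, List.map_cons, List.map_nil]
        have hnkc : nk (st.map Prod.fst) (c :: rest.map Prod.fst)
            = c :: nk (st.map Prod.fst ++ [c]) (rest.map Prod.fst) := by
          simp [nk, hnmem]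
        rw [hnkc]
        have hfst : st.map (fun kv => (kv.1, dIn kv.2 (mpVals rest kv.1)))
            = st.map (fun kv => (kv.1, dIn kv.2 (mpVals ((c, some t) :: rest) kv.1))) := by
          refine List.map_congr_left fun kv hkv => ?_
          have hne : c ≠ kv.1 := fun e => hnmem (e ▸ List.mem_map_of_mem hkv)
          simp [hvals, hne]
        have hhd : dIn [t] (mpVals rest c) = dIn [] (mpVals ((c, some t) :: rest) c) := by
          simp [hvals, dIn]
        have htl : (nk (st.map Prod.fst ++ [c]) (rest.map Prod.fst)).map
              (fun c' => (c', dIn [] (mpVals rest c')))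
            = (nk (st.map Prod.fst ++ [c]) (rest.map Prod.fst)).map
              (fun c' => (c', dIn [] (mpVals ((c, some t) :: rest) c'))) := by
          refine nk_map_congr _ _ _ _ fun c' hc' => ?_
          have hne : ¬ (c = c') := fun e => mem_nk hc' (by simp [e.symm])
          simp [hvals, hne]
        simp only [List.map_cons, hfst, hhd, htl, List.append_assoc,
          List.cons_append, List.nil_append]

lemma foldA_eq_mergeC (flat : List (String × Option String)) :
    ∀ st : List (String × List String), (st.map Prod.fst).Nodup →
      flat.foldl mpStepA st = mergeC st flat := by
  induction flat with
  | nil =>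
    intro st _
    simp [mergeC, mpVals, dIn, nk]
  | cons p rest ih =>
    intro st hnd
    rw [List.foldl_cons, ih (mpStepA st p) (keys_stepA st p hnd), step_mergeC st p rest hnd]

-- ===== VERDICT (by name: the statement is the Claim_ definition above) =====
theorem merge_pairs_spec : Claim_equal_merge_pairs := by
  intro lop _
  show merge_pairs lop = merge_pairs_alt lop
  unfold merge_pairs merge_pairs_alt
  rw [← List.foldl_flatten, foldA_eq_mergeC lop.flatten [] (by simp)]
  have hd : pyDedup (lop.flatten.map Prod.fst) = nk [] (lop.flatten.map Prod.fst) := by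
    simpa [pyDedup] using dIn_eq_append_nk (lop.flatten.map Prod.fst) []
  simp only [mergeC, List.map_nil, List.nil_append, hd]
  rfl
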